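-- pv_equiv track=rewrite | github.com/pypi-data/pypi-mirror-308 | packages/casino-bdata4-e/casino_bdata4_e-0.0.1.tar.gz/casino_bdata4_e-0.0.1/casino_bdata4_e/cartas.py | calcular_fuerza_mano
-- ===== SOURCE A (Python) =====
-- def calcular_fuerza_mano(mano):
--     """
--     Simula una función para calcular la fuerza de una mano de póker. Este es un ejemplo simplificado.
--     La máquina puede basarse en esta "fuerza" para decidir qué hacer.
--     """
--     # Este es solo un ejemplo básico. Puedes agregar una lógica más avanzada de cálculo de manos de póker.
--     valores = [c[0] for c in mano]
--     if 'A' in valores: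
--         return 1  # Mano con As (simplemente para ilustrar)
--     elif 'K' in valores:
--         return 2  # Mano con Rey
--     elif 'Q' in valores:
--         return 3  # Mano con Reina
--     return 0  # Manos básicas
-- ===== SOURCE B (Python) =====
-- def calcular_fuerza_mano(mano):
--     """
--     Simula una función para calcular la fuerza de una mano de póker. Este es un ejemplo simplificado.
--     La máquina puede basarse en esta "fuerza" para decidir qué hacer.
--     """
--     ranks = {'A': 1, 'K': 2, 'Q': 3}
--     present = [ranks[c[0]] for c in mano if c[0] in ranks]
--     return min(present) if present else 0
-- ===== Notes on version B (the rewrite author's own statement) =====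
-- stated objective: alternative
-- what changed: Replaces A's three separate membership scans over the extracted values with a single pass that maps each face card to its priority via a dict and returns the minimum priority (0 if none).
import Mathlib
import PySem

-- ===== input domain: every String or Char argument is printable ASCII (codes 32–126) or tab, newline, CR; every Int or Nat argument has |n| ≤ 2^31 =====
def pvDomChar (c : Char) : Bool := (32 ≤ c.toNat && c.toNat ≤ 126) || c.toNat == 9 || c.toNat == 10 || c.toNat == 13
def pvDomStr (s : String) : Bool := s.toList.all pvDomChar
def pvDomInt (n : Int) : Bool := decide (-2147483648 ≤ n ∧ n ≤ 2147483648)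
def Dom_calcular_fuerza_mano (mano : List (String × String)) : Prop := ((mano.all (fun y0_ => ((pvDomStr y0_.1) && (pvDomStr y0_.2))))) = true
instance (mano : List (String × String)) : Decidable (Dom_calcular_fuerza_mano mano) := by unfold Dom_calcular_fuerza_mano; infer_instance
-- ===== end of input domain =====

-- B replaces A's priority-ordered membership scans by one pass collecting face priorities
-- from a rank dict and taking their minimum (alternative decomposition, same cost).

-- ===== PORT A =====
def calcular_fuerza_mano (mano : List (String × String)) : Int :=
  let valores := mano.map (fun c => c.1)
  if valores.contains "A" then 1
  else if valores.contains "K" then 2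
  else if valores.contains "Q" then 3
  else 0

-- ===== PORT B =====
def calcular_fuerza_mano_alt (mano : List (String × String)) : Int :=
  let ranks : PySem.Dict String Int := PySem.Dict.ofList [("A", 1), ("K", 2), ("Q", 3)]
  let present : List Int :=
    (mano.filter (fun c => ranks.contains c.1)).map (fun c => (ranks.get? c.1).getD 0)
  match PySem.List.min? present (fun x => x) with
  | some m => m
  | none => 0

-- ===== PRECONDITION & SPEC =====
def Spec_calcular_fuerza_mano (mano : List (String × String)) (out : Int) : Prop := out = calcular_fuerza_mano_alt mano
instance (mano : List (String × String)) (out : Int) : Decidable (Spec_calcular_fuerza_mano mano out) := by unfold Spec_calcular_fuerza_mano; infer_instance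

-- ===== CLAIM (what is proved, stated in full; the proofs are below) =====
def Claim_equal_calcular_fuerza_mano : Prop := ∀ (mano : List (String × String)), Dom_calcular_fuerza_mano mano → Spec_calcular_fuerza_mano mano (calcular_fuerza_mano mano)

-- ===== LEMMAS AND PROOFS =====

-- The "present" list of B's port, rewritten as a filterMap.
def pvRank (s : String) : Option Int :=
  if s = "A" then some 1 else if s = "K" then some 2 else if s = "Q" then some 3 else none

lemma ranks_items :
    (PySem.Dict.ofList [("A", (1:Int)), ("K", 2), ("Q", 3)]).items
      = [("A", 1), ("K", 2), ("Q", 3)] := by decide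

lemma pvMapFilter {α β : Type} (f : α → β) (p : α → Bool) (l : List α) :
    (l.filter p).map f = l.filterMap (fun x => if p x then some (f x) else none) := by
  induction l with
  | nil => rfl
  | cons h t ih => by_cases hp : p h <;> simp [hp, ih]

lemma present_eq (mano : List (String × String)) :
    ((mano.filter (fun c => (PySem.Dict.ofList [("A", (1:Int)), ("K", 2), ("Q", 3)]).contains c.1)).map
      (fun c => ((PySem.Dict.ofList [("A", (1:Int)), ("K", 2), ("Q", 3)]).get? c.1).getD 0))
    = mano.filterMap (fun c => pvRank c.1) := by
  rw [pvMapFilter]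
  apply List.filterMap_congr
  intro c _
  by_cases h1 : c.1 = "A"
  · simp [pvRank, PySem.Dict.contains, PySem.Dict.get?, ranks_items, h1]
  · by_cases h2 : c.1 = "K"
    · simp [pvRank, PySem.Dict.contains, PySem.Dict.get?, ranks_items, h2]
    · by_cases h3 : c.1 = "Q"
      · simp [pvRank, PySem.Dict.contains, PySem.Dict.get?, ranks_items, h3]
      · simp [pvRank, PySem.Dict.contains, ranks_items, h1, h2, h3, Ne.symm h1, Ne.symm h2, Ne.symm h3]

lemma mem_present {mano : List (String × String)} {m : Int}
    (h : m ∈ mano.filterMap (fun c => pvRank c.1)) :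
    (m = 1 ∧ "A" ∈ mano.map (fun c => c.1)) ∨
    (m = 2 ∧ "K" ∈ mano.map (fun c => c.1)) ∨
    (m = 3 ∧ "Q" ∈ mano.map (fun c => c.1)) := by
  rcases List.mem_filterMap.mp h with ⟨c, hc, hr⟩
  unfold pvRank at hr
  split_ifs at hr with h1 h2 h3
  · exact Or.inl ⟨(Option.some_inj.mp hr).symm, List.mem_map.mpr ⟨c, hc, h1⟩⟩
  · exact Or.inr (Or.inl ⟨(Option.some_inj.mp hr).symm, List.mem_map.mpr ⟨c, hc, h2⟩⟩)
  · exact Or.inr (Or.inr ⟨(Option.some_inj.mp hr).symm, List.mem_map.mpr ⟨c, hc, h3⟩⟩)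

lemma rank_mem_present {mano : List (String × String)} {s : String} {v : Int}
    (hs : s ∈ mano.map (fun c => c.1)) (hv : pvRank s = some v) :
    v ∈ mano.filterMap (fun c => pvRank c.1) := by
  rcases List.mem_map.mp hs with ⟨c, hc, rfl⟩
  exact List.mem_filterMap.mpr ⟨c, hc, hv⟩

lemma min?_some_of_mem {P : List Int} {x : Int} (hx : x ∈ P) :
    ∃ m, PySem.List.min? P (fun y => y) = some m := by
  cases h : PySem.List.min? P (fun y => y) with
  | none => rw [PySem.List.min?_eq_none_iff] at h; subst h; simp at hx
  | some m => exact ⟨m, rfl⟩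

-- ===== VERDICT (by name: the statement is the Claim_ definition above) =====
theorem calcular_fuerza_mano_spec : Claim_equal_calcular_fuerza_mano := by
  intro mano _
  unfold Spec_calcular_fuerza_mano calcular_fuerza_mano calcular_fuerza_mano_alt
  simp only [present_eq]
  by_cases hA : "A" ∈ mano.map (fun c => c.1)
  · obtain ⟨m, hmin⟩ := min?_some_of_mem (rank_mem_present hA (by rfl))
    have hle : m ≤ 1 := PySem.List.min?_isMin hmin 1 (rank_mem_present hA (by rfl))
    have hm : m = 1 := by
      rcases mem_present (PySem.List.min?_mem hmin) with ⟨h, _⟩ | ⟨h, _⟩ | ⟨h, _⟩ <;> omega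
    simp [hA, hmin, hm]
  · by_cases hK : "K" ∈ mano.map (fun c => c.1)
    · obtain ⟨m, hmin⟩ := min?_some_of_mem (rank_mem_present hK (by rfl))
      have hle : m ≤ 2 := PySem.List.min?_isMin hmin 2 (rank_mem_present hK (by rfl))
      have hm : m = 2 := by
        rcases mem_present (PySem.List.min?_mem hmin) with ⟨h, hmem⟩ | ⟨h, _⟩ | ⟨h, _⟩
        · exact absurd hmem hA
        · exact h
        · omega
      simp [hA, hK, hmin, hm]
    · by_cases hQ : "Q" ∈ mano.map (fun c => c.1)
      · obtain ⟨m, hmin⟩ := min?_some_of_mem (rank_mem_present hQ (by rfl))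
        have hm : m = 3 := by
          rcases mem_present (PySem.List.min?_mem hmin) with ⟨h, hmem⟩ | ⟨h, hmem⟩ | ⟨h, _⟩
          · exact absurd hmem hA
          · exact absurd hmem hK
          · exact h
        simp [hA, hK, hQ, hmin, hm]
      · have hempty : mano.filterMap (fun c => pvRank c.1) = [] := by
          rw [List.filterMap_eq_nil_iff]
          intro c hc
          unfold pvRank
          split_ifs with h1 h2 h3
          · exact absurd (List.mem_map.mpr ⟨c, hc, h1⟩) hA
          · exact absurd (List.mem_map.mpr ⟨c, hc, h2⟩) hK
          · exact absurd (List.mem_map.mpr ⟨c, hc, h3⟩) hQ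
          · rfl
        rw [hempty]
        simp [hA, hK, hQ]
        rfl
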